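-- pv_equiv track=rewrite | github.com/xiaoouwang/tuto_classification | scraper.py | classify_links
-- ===== SOURCE A (Python) =====
-- from collections import defaultdict
--
-- def classify_links(theme_list, link_list):
--     dict_links = defaultdict(list)
--     for theme in theme_list:
--         theme_link = 'https://www.lemonde.fr/' + theme + '/article/'
--         for link in link_list:
--             if theme_link in link:
--                 dict_links[theme].append(link)
--     return dict_links
-- ===== SOURCE B (Python) =====
-- def classify_links(theme_list, link_list):
--     # One pass over the links: collect (theme-index, link) hit pairs, then group
--     # them by theme index in theme order.  Matches A for theme lists without
--     # duplicate themes (A double-appends under a duplicated theme).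
--     pats = ['https://www.lemonde.fr/' + t + '/article/' for t in theme_list]
--     hits = [(i, link) for link in link_list for i, p in enumerate(pats) if p in link]
--     return {t: [l for j, l in hits if j == i]
--             for i, t in enumerate(theme_list) if any(j == i for j, _ in hits)}
-- ===== Notes on version B (the rewrite author's own statement) =====
-- stated objective: alternative
-- what changed: B makes one link-major pass collecting (theme-index, link) hit pairs and then groups them by index in theme order, instead of A's theme-major loop that rescans the whole link list per theme into a defaultdict; Pre_ excludes the duplicate-key corner where a duplicated theme has a matching link.
import Mathlib
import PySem

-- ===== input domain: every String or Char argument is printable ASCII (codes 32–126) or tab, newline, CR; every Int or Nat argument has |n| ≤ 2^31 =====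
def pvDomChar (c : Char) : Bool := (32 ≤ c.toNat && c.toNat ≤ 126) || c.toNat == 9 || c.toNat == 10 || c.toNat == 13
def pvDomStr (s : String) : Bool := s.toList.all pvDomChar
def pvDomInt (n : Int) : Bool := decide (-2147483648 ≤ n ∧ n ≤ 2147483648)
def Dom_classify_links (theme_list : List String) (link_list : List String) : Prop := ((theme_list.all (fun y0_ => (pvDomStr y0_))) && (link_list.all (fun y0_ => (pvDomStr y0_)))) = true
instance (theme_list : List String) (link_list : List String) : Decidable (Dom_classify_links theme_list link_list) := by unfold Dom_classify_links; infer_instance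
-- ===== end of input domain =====

-- B replaces A's theme-major rescan of the link list per theme by one link-major
-- pass collecting (theme-index, link) hit pairs, grouped afterwards in theme order
-- (objective: alternative; same asymptotic cost).


-- ===== PORT A =====
-- A-side helper: the body of A's outer loop ('for theme in theme_list: …')
def pvStep (link_list : List String) (d : PySem.Dict String (List String)) (theme : String) : PySem.Dict String (List String) :=
  let theme_link := "https://www.lemonde.fr/" ++ theme ++ "/article/"
  link_list.foldl (fun d link =>
    if PySem.Str.isIn theme_link link then PySem.Dict.modify d theme [] (· ++ [link]) else d) d

def classify_links (theme_list : List String) (link_list : List String) : List (String × List String) :=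
  (theme_list.foldl (pvStep link_list) (PySem.Dict.mk [])).items

-- ===== PORT B =====
def classify_links_alt (theme_list : List String) (link_list : List String) : List (String × List String) :=
  let pats := theme_list.map (fun t => "https://www.lemonde.fr/" ++ t ++ "/article/")
  let hits := link_list.flatMap (fun link =>
    ((PySem.List.enumerate pats).filter (fun ip => PySem.Str.isIn ip.2 link)).map (fun ip => (ip.1, link)))
  -- dict comprehension keyed by the themes; its keys are distinct under Pre_ (Nodup),
  -- so it is the association list in theme order
  (PySem.List.enumerate theme_list).filterMap (fun it =>
    if hits.any (fun h => h.1 == it.1) then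
      some (it.2, (hits.filter (fun h => h.1 == it.1)).map (fun h => h.2))
    else none)

-- ===== PRECONDITION & SPEC =====
-- Pre_ excludes inputs on which some DUPLICATED theme has a matching link: that is a
-- duplicate-key corner where no single grouping is specified — A appends that theme's
-- matching links once per occurrence under the single key, B lists each matching link
-- once; both readings are defensible, so those inputs are outside the claim.
def Pre_classify_links (theme_list : List String) (link_list : List String) : Prop :=
  ∀ t ∈ theme_list, 1 < theme_list.count t →
    ∀ l ∈ link_list, PySem.Str.isIn ("https://www.lemonde.fr/" ++ t ++ "/article/") l = false

instance (theme_list : List String) (link_list : List String) : Decidable (Pre_classify_links theme_list link_list) := by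
  unfold Pre_classify_links; infer_instance

def pvWitness_classify_links : List String × List String :=
  (["politique", "sport"],
   ["https://www.lemonde.fr/politique/article/2020/01/01/a.html", "https://what.ever/x"])

def Spec_classify_links (theme_list : List String) (link_list : List String) (out : List (String × List String)) : Prop := out = classify_links_alt theme_list link_list
instance (theme_list : List String) (link_list : List String) (out : List (String × List String)) : Decidable (Spec_classify_links theme_list link_list out) := by unfold Spec_classify_links; infer_instance

-- ===== CLAIM (what is proved, stated in full; the proofs are below) =====
def Claim_equal_classify_links : Prop := ∀ (theme_list : List String) (link_list : List String), Dom_classify_links theme_list link_list → Pre_classify_links theme_list link_list → Spec_classify_links theme_list link_list (classify_links theme_list link_list)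

-- ===== LEMMAS AND PROOFS =====

-- shared vocabulary of the proofs
def pvPat (t : String) : String := "https://www.lemonde.fr/" ++ t ++ "/article/"
def pvM (t l : String) : Bool := PySem.Str.isIn (pvPat t) l
def pvMatched (link_list : List String) (t : String) : List String := link_list.filter (pvM t)
def pvCanon (link_list : List String) (xs : List String) : List (String × List String) :=
  xs.filterMap (fun t => if pvMatched link_list t = [] then none else some (t, pvMatched link_list t))

-- ===== A-side =====

-- appending matches one by one when the key is already the LAST entry
theorem pv_foldl_modify_present (t : String) (ms : List String) :
    ∀ (es : List (String × List String)) (v : List String),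
    (∀ p ∈ es, (p.1 == t) = false) →
    (ms.foldl (fun d m => PySem.Dict.modify d t [] (· ++ [m])) (PySem.Dict.mk (es ++ [(t, v)]))).items
      = es ++ [(t, v ++ ms)] := by
  induction ms with
  | nil => intro es v h; simp
  | cons m rest ih =>
    intro es v h
    have hfind : List.find? (fun p => p.1 == t) (es ++ [(t, v)]) = some (t, v) := by
      rw [List.find?_append]
      have : List.find? (fun p => p.1 == t) es = none := by
        rw [List.find?_eq_none]; intro p hp; simp [h p hp]
      simp [this]
    have hcont : (PySem.Dict.mk (es ++ [(t, v)])).contains t = true := by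
      simp only [PySem.Dict.contains, PySem.Dict.items, List.any_eq_true]
      exact ⟨(t, v), by simp, by simp⟩
    have hmod : PySem.Dict.modify (PySem.Dict.mk (es ++ [(t, v)])) t [] (· ++ [m])
        = PySem.Dict.mk (es ++ [(t, v ++ [m])]) := by
      simp only [PySem.Dict.modify, PySem.Dict.insert, hcont, if_pos, PySem.Dict.getD,
        PySem.Dict.get?, PySem.Dict.items, hfind]
      congr 1
      rw [List.map_append]
      congr 1
      · conv_rhs => rw [← List.map_id es]
        exact List.map_congr_left (fun p hp => by simp [h p hp])
      · simp
    rw [List.foldl_cons, hmod, ih es (v ++ [m]) h]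
    simp

-- one theme's whole inner loop, starting from a dict that does not contain the theme
theorem pv_foldl_modify_absent (t : String) (ms : List String) (es : List (String × List String))
    (h : ∀ p ∈ es, (p.1 == t) = false) :
    (ms.foldl (fun d m => PySem.Dict.modify d t [] (· ++ [m])) (PySem.Dict.mk es)).items
      = es ++ (if ms = [] then [] else [(t, ms)]) := by
  cases ms with
  | nil => simp
  | cons m rest =>
    have hfind : List.find? (fun p => p.1 == t) es = none := by
      rw [List.find?_eq_none]; intro p hp; simp [h p hp]
    have hcont : (PySem.Dict.mk es).contains t = false := by
      simp only [PySem.Dict.contains, PySem.Dict.items]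
      rw [List.any_eq_false]
      intro p hp; simp [h p hp]
    have hmod : PySem.Dict.modify (PySem.Dict.mk es) t [] (· ++ [m])
        = PySem.Dict.mk (es ++ [(t, [m])]) := by
      simp [PySem.Dict.modify, PySem.Dict.insert, hcont, PySem.Dict.getD, PySem.Dict.get?,
        PySem.Dict.items, hfind]
    rw [List.foldl_cons, hmod, pv_foldl_modify_present t rest es [m] h]
    simp

theorem pv_step_items (link_list : List String) (t : String) (es : List (String × List String))
    (h : ∀ p ∈ es, (p.1 == t) = false) :
    (pvStep link_list (PySem.Dict.mk es) t).items
      = es ++ (if pvMatched link_list t = [] then [] else [(t, pvMatched link_list t)]) := by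
  unfold pvStep
  have : link_list.foldl
      (fun d link => if PySem.Str.isIn ("https://www.lemonde.fr/" ++ t ++ "/article/") link
        then PySem.Dict.modify d t [] (· ++ [link]) else d) (PySem.Dict.mk es)
      = (link_list.filter (pvM t)).foldl (fun d m => PySem.Dict.modify d t [] (· ++ [m]))
          (PySem.Dict.mk es) := by
    rw [List.foldl_filter]; rfl
  rw [this, pv_foldl_modify_absent t _ es h]; rfl

theorem pv_step_nil (link_list : List String) (t : String) (d : PySem.Dict String (List String))
    (hm : pvMatched link_list t = []) : pvStep link_list d t = d := by
  unfold pvStep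
  have : link_list.foldl
      (fun d link => if PySem.Str.isIn ("https://www.lemonde.fr/" ++ t ++ "/article/") link
        then PySem.Dict.modify d t [] (· ++ [link]) else d) d
      = (link_list.filter (pvM t)).foldl (fun d m => PySem.Dict.modify d t [] (· ++ [m])) d := by
    rw [List.foldl_filter]; rfl
  rw [this]
  have hm' : link_list.filter (pvM t) = [] := hm
  rw [hm']
  rfl

theorem pv_outer (link_list : List String) :
    ∀ (xs : List String) (es : List (String × List String)),
    (∀ u ∈ xs, pvMatched link_list u ≠ [] → xs.count u = 1 ∧ ∀ p ∈ es, (p.1 == u) = false) →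
    (xs.foldl (pvStep link_list) (PySem.Dict.mk es)).items = es ++ pvCanon link_list xs := by
  intro xs
  induction xs with
  | nil => intro es _; simp [pvCanon]
  | cons x rest ih =>
    intro es h
    rw [List.foldl_cons]
    by_cases hm : pvMatched link_list x = []
    · rw [pv_step_nil link_list x _ hm, ih es ?_]
      · simp only [pvCanon, List.filterMap_cons, hm]
        simp
      · intro u hu hmu
        have hux : u ≠ x := fun e => hmu (e ▸ hm)
        have := h u (by simp [hu]) hmu
        refine ⟨?_, this.2⟩
        have h1 := this.1
        rw [List.count_cons] at h1
        simpa [Ne.symm hux] using h1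
    · have hx := h x (by simp) hm
      have habs : ∀ p ∈ es, (p.1 == x) = false := hx.2
      have hxr : x ∉ rest := by
        have := hx.1
        rw [List.count_cons_self] at this
        exact List.count_eq_zero.mp (by omega)
      have hd : pvStep link_list (PySem.Dict.mk es) x
          = PySem.Dict.mk (es ++ [(x, pvMatched link_list x)]) := by
        apply PySem.Dict.ext
        have := pv_step_items link_list x es habs
        simpa [hm] using this
      rw [hd, ih _ ?_]
      · simp only [pvCanon, List.filterMap_cons, hm]
        simp [hm]
      · intro u hu hmu
        have hux : u ≠ x := fun e => hxr (e ▸ hu)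
        have := h u (by simp [hu]) hmu
        constructor
        · have h1 := this.1
          rw [List.count_cons] at h1
          simpa [Ne.symm hux] using h1
        · intro p hp
          rcases List.mem_append.mp hp with hp | hp
          · exact this.2 p hp
          · simp at hp
            simp [hp, hux.symm]

theorem pv_A_eq (theme_list link_list : List String)
    (h : Pre_classify_links theme_list link_list) :
    classify_links theme_list link_list = pvCanon link_list theme_list := by
  unfold classify_links
  rw [pv_outer link_list theme_list [] ?_]
  · simp
  · intro u hu hmu
    refine ⟨?_, by simp⟩
    have hcnt : ¬ (1 < theme_list.count u) := by
      intro hlt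
      apply hmu
      have hall := h u hu hlt
      apply List.filter_eq_nil_iff.mpr
      intro l hl
      intro hcontra
      rw [show pvM u l = PySem.Str.isIn ("https://www.lemonde.fr/" ++ u ++ "/article/") l from rfl] at hcontra
      rw [hall l hl] at hcontra
      exact Bool.false_ne_true hcontra
    have : 0 < theme_list.count u := List.count_pos_iff.mpr hu
    omega

-- ===== B-side =====

theorem pv_enum_filter_idx (xs : List String) :
    ∀ (s : Int) (k : Nat) (hk : k < xs.length),
    (PySem.List.enumerate xs s).filter (fun ip => ip.1 == s + (k : Int)) = [(s + (k : Int), xs[k])] := by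
  induction xs with
  | nil => intro s k hk; simp at hk
  | cons x rest ih =>
    intro s k hk
    rw [PySem.List.enumerate_cons]
    cases k with
    | zero =>
      simp only [Nat.cast_zero, add_zero]
      rw [List.filter_cons]
      simp only [beq_self_eq_true, if_pos]
      have : (PySem.List.enumerate rest (s + 1)).filter (fun ip => ip.1 == s) = [] := by
        rw [List.filter_eq_nil_iff]
        intro p hp
        rcases (PySem.List.mem_enumerate_iff _ _ _).mp hp with ⟨j, hj, rfl⟩
        simp only [beq_eq_false_iff_ne, ne_eq]
        simp
        omega
      rw [this]
      simp
    | succ k' =>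
      push_cast
      rw [List.filter_cons]
      have hne : (s == s + ((k' : Int) + 1)) = false := by
        simp only [beq_eq_false_iff_ne, ne_eq]; omega
      rw [hne]
      simp only [Bool.false_eq_true, if_false]
      have harith : ∀ ip : Int × String, (ip.1 == s + ((k' : Int) + 1)) = (ip.1 == (s + 1) + (k' : Int)) := by
        intro ip; congr 1; omega
      rw [List.filter_congr (fun ip _ => harith ip)]
      rw [ih (s + 1) k' (by simpa using hk)]
      have : (s + 1) + (k' : Int) = s + ((k' : Int) + 1) := by omega
      rw [this]
      simp

theorem pv_flatMap_if (p : String → Bool) (l : List String) :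
    l.flatMap (fun x => if p x then [x] else []) = l.filter p := by
  induction l with
  | nil => rfl
  | cons x xs ih => cases h : p x <;> simp [List.flatMap_cons, h, ih, List.filter_cons]

-- the bucket for theme index k, read off the link-major hit list
theorem pv_bucket (pats link_list : List String) (k : Nat) (hk : k < pats.length) :
    ((link_list.flatMap (fun link =>
        ((PySem.List.enumerate pats).filter (fun ip => PySem.Str.isIn ip.2 link)).map
          (fun ip => (ip.1, link)))).filter (fun h => h.1 == (k : Int))).map (fun h => h.2)
      = link_list.filter (fun l => PySem.Str.isIn pats[k] l) := by
  rw [List.filter_flatMap, List.map_flatMap]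
  have hone : ∀ link : String,
      ((((PySem.List.enumerate pats).filter (fun ip => PySem.Str.isIn ip.2 link)).map
          (fun ip => (ip.1, link))).filter (fun h => h.1 == (k : Int))).map (fun h => h.2)
        = if PySem.Str.isIn pats[k] link then [link] else [] := by
    intro link
    rw [List.filter_map]
    have hcomp : ((fun h : Int × String => h.1 == (k : Int)) ∘ (fun ip : Int × String => (ip.1, link)))
        = fun ip : Int × String => ip.1 == (k : Int) := rfl
    rw [hcomp, List.filter_filter]
    have hcomm : ∀ ip : Int × String,
        (((ip.1 == (k : Int)) && PySem.Str.isIn ip.2 link) : Bool)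
          = ((PySem.Str.isIn ip.2 link && (ip.1 == (k : Int))) : Bool) := fun ip => Bool.and_comm _ _
    rw [List.filter_congr (fun ip _ => hcomm ip), ← List.filter_filter]
    have := pv_enum_filter_idx pats 0 k hk
    simp only [zero_add] at this
    rw [this]
    cases h : PySem.Str.isIn pats[k] link <;>
      · have h2 : PySem.Chars.isIn pats[k].toList link.toList = _ := h
        simp [List.filter_cons, h, h2]
  rw [List.flatMap_congr (fun link _ => hone link)]  -- may need funext form
  exact pv_flatMap_if _ _

-- grouping the hit pairs index by index gives the canonical theme-major form
theorem pv_assemble (hits : List (Int × String)) (link_list : List String) :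
    ∀ (xs : List String) (s : Int),
    (∀ (k : Nat) (hk : k < xs.length),
        (hits.filter (fun h => h.1 == s + (k : Int))).map (fun h => h.2) = pvMatched link_list xs[k]) →
    (PySem.List.enumerate xs s).filterMap (fun it =>
        if hits.any (fun h => h.1 == it.1) then
          some (it.2, (hits.filter (fun h => h.1 == it.1)).map (fun h => h.2))
        else none)
      = pvCanon link_list xs := by
  intro xs
  induction xs with
  | nil => intro s _; simp [pvCanon]
  | cons x rest ih =>
    intro s h
    rw [PySem.List.enumerate_cons, List.filterMap_cons]
    have h0 : (hits.filter (fun h => h.1 == s)).map (fun h => h.2) = pvMatched link_list x := by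
      have := h 0 (by simp)
      simpa using this
    have hany : (hits.any (fun h => h.1 == s)) = !(pvMatched link_list x).isEmpty := by
      rw [← h0]
      rcases hf : hits.filter (fun h => h.1 == s) with _ | ⟨p, ps⟩
      · have : hits.any (fun h => h.1 == s) = false := by
          rw [List.any_eq_false]; intro p hp
          have := List.filter_eq_nil_iff.mp hf p hp; simpa using this
        simp [this, hf]
      · have hpmem : p ∈ hits.filter (fun h => h.1 == s) := by rw [hf]; simp
        have : hits.any (fun h => h.1 == s) = true := by
          rw [List.any_eq_true]
          exact ⟨p, (List.mem_filter.mp hpmem).1, (List.mem_filter.mp hpmem).2⟩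
        simp [this, hf]
    have hrest : (PySem.List.enumerate rest (s + 1)).filterMap (fun it =>
        if hits.any (fun h => h.1 == it.1) then
          some (it.2, (hits.filter (fun h => h.1 == it.1)).map (fun h => h.2))
        else none) = pvCanon link_list rest := by
      apply ih
      intro k hk
      have := h (k + 1) (by simpa using Nat.succ_lt_succ hk)
      push_cast at this ⊢
      have harith : ∀ ip : Int × String, (ip.1 == s + ((k : Int) + 1)) = (ip.1 == (s + 1) + (k : Int)) := by
        intro ip; congr 1; omega
      rw [List.filter_congr (fun ip _ => harith ip)] at this
      simpa using this
    rw [hrest]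
    simp only [pvCanon, List.filterMap_cons]
    by_cases hm : pvMatched link_list x = []
    · simp [hany, hm]
    · have hne : (pvMatched link_list x).isEmpty = false := by
        simp [List.isEmpty_iff, hm]
      simp [hany, hne, hm, h0]

theorem pv_B_eq (theme_list link_list : List String) :
    classify_links_alt theme_list link_list = pvCanon link_list theme_list := by
  unfold classify_links_alt
  apply pv_assemble
  intro k hk
  simp only [zero_add]
  rw [pv_bucket (theme_list.map (fun t => "https://www.lemonde.fr/" ++ t ++ "/article/")) link_list k (by simpa using hk)]
  simp only [List.getElem_map]
  rfl

-- ===== VERDICT (by name: the statement is the Claim_ definition above) =====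
theorem classify_links_spec : Claim_equal_classify_links := by
  intro theme_list link_list _ hpre
  unfold Spec_classify_links
  rw [pv_A_eq theme_list link_list hpre, pv_B_eq theme_list link_list]
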